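-- pv_equiv track=rewrite | github.com/BGT-M/spartan2 | spartan/model/eaglemine/utils/mdlbase.py | integer_elias_encode
-- ===== SOURCE A (Python) =====
-- def integer_elias_encode(z):
--     if z < 0:
--         ValueError("The Elias encoding can't cope with the negative integer. "
--                    "Input non-negative integer value.")
--     z += 1
--     code = ''
--     val_code = bin(z)[2:]
--     while len(val_code) > 1:
--         code = val_code + code
--         pre_len = len(val_code)
--         val_code = bin(pre_len - 1)[2:]
--     code += '0'    # the halt bit.
--     return code
-- ===== SOURCE B (Python) =====
-- def _bits(v):
--     # binary digits of v >= 1, most significant first, built arithmetically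
--     if v > 1:
--         return _bits(v >> 1) + ('1' if v & 1 else '0')
--     return '1'
--
--
-- def _omega(v):
--     # Elias-omega chunk list for v >= 1, threaded over the shrinking bit-length
--     if v < 2:
--         return ''
--     return _omega(v.bit_length() - 1) + _bits(v)
--
--
-- def integer_elias_encode(z):
--     if z < 0:
--         raise ValueError("The Elias encoding can't cope with the negative integer. "
--                          "Input non-negative integer value.")
--     return _omega(z + 1) + '0'
-- ===== Notes on version B (the rewrite author's own statement) =====
-- stated objective: alternative
-- what changed: Replaces the while-loop that repeatedly prepends bin()-sliced strings onto an accumulator with a direct recursion over the shrinking bit-length (Elias-omega chunks emitted front-to-back), with the binary digits themselves produced by arithmetic recursion instead of bin() slicing.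
-- outside the precondition, e.g. on integer_elias_encode(-2): A returns 'b10', B raises ValueError; on integer_elias_encode(-1): A returns '0', B raises ValueError
import Mathlib
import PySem

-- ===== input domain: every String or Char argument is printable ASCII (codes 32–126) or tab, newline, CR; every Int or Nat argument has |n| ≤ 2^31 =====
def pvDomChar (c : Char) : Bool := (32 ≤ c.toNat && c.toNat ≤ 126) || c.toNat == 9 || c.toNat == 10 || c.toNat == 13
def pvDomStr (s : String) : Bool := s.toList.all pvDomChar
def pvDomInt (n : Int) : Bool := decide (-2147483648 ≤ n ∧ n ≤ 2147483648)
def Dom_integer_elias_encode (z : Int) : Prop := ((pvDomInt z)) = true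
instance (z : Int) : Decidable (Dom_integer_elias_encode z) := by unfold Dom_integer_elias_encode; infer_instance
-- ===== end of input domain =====

-- B is the Elias-omega recursion over the shrinking bit-length (alternative decomposition, same cost);
-- B raises the ValueError that A's dead guard only constructs, so Pre_ excludes z < 0.

-- ===== PORT A =====

-- binary digits of n ≥ 1, most significant first (hand-port of the digit string bin() produces; exact for n ≥ 1)
def bitsPos (n : Nat) : List Char :=
  if h : n < 2 then ['1']
  else bitsPos (n / 2) ++ [if n % 2 = 1 then '1' else '0']
  termination_by n
  decreasing_by omega

-- Python bin(n): '0b…' for n ≥ 0, '-0b…' for n < 0 (exact port of bin as a character list)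
def pyBin (n : Int) : List Char :=
  if n < 0 then '-' :: '0' :: 'b' :: bitsPos (-n).toNat
  else if n = 0 then ['0', 'b', '0']
  else '0' :: 'b' :: bitsPos n.toNat

theorem bitsPos_length_le : ∀ n : Nat, 1 ≤ n → (bitsPos n).length ≤ n := by
  intro n
  induction n using Nat.strong_induction_on with
  | _ n ih =>
    intro h1
    rw [bitsPos]
    split
    · simpa using h1
    · rename_i h2
      have := ih (n / 2) (by omega) (by omega)
      simp only [List.length_append, List.length_cons, List.length_nil]
      omega

-- A's while-loop: code = val_code + code; val_code = bin(len(val_code) - 1)[2:]  (s[2:] on these strings = drop 2)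
def loopA (valCode code : List Char) : List Char :=
  if h : valCode.length > 1 then
      loopA ((pyBin ((valCode.length : Int) - 1)).drop 2) (valCode ++ code)
    else code
  termination_by valCode.length
  decreasing_by
    simp only [pyBin]
    have hl : ¬ ((valCode.length : Int) - 1 < 0) := by omega
    have hz : ¬ ((valCode.length : Int) - 1 = 0) := by omega
    rw [if_neg hl, if_neg hz]
    have : ((valCode.length : Int) - 1).toNat = valCode.length - 1 := by omega
    have hle := bitsPos_length_le (((valCode.length : Int) - 1).toNat) (by omega)
    simp only [List.drop_succ_cons, List.drop_zero]
    omega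

def integer_elias_encode (z : Int) : String :=
  String.mk (loopA ((pyBin (z + 1)).drop 2) [] ++ ['0'])

-- ===== PORT B =====

-- port of B's _bits: binary digits of v ≥ 1 by arithmetic recursion (v >> 1 = v / 2)
def bitsB (v : Nat) : List Char :=
  if h : v > 1 then bitsB (v / 2) ++ [if v % 2 = 1 then '1' else '0']
  else ['1']
  termination_by v
  decreasing_by omega

-- port of int.bit_length()
def bitLenB (v : Nat) : Nat :=
  if h : v = 0 then 0 else bitLenB (v / 2) + 1
  termination_by v
  decreasing_by omega

theorem bitLenB_le : ∀ v : Nat, 1 ≤ v → bitLenB v ≤ v := by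
  intro v
  induction v using Nat.strong_induction_on with
  | _ v ih =>
    intro h1
    rw [bitLenB]
    split
    · omega
    · by_cases h2 : v = 1
      · subst h2; rw [bitLenB]; simp
      · have := ih (v / 2) (by omega) (by omega)
        omega

-- port of B's _omega
def omegaB (v : Nat) : List Char :=
  if h : v < 2 then []
  else omegaB (bitLenB v - 1) ++ bitsB v
  termination_by v
  decreasing_by
    have := bitLenB_le v (by omega)
    omega

-- Python B raises ValueError for z < 0 (outside Pre_); the port returns "" there.
def integer_elias_encode_alt (z : Int) : String :=
  if z < 0 then ""
  else String.mk (omegaB (z + 1).toNat ++ ['0'])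

-- ===== PRECONDITION & SPEC =====
-- Pre_ excludes z < 0: there A's ValueError guard is dead (the exception is built but not raised) and
-- bin() of a negative makes A return accidental strings like 'b10'; B raises the ValueError as intended.
def Pre_integer_elias_encode (z : Int) : Prop := 0 ≤ z
instance (z : Int) : Decidable (Pre_integer_elias_encode z) := by unfold Pre_integer_elias_encode; infer_instance
def pvWitness_integer_elias_encode : Int := (5)

def Spec_integer_elias_encode (z : Int) (out : String) : Prop := out = integer_elias_encode_alt z
instance (z : Int) (out : String) : Decidable (Spec_integer_elias_encode z out) := by unfold Spec_integer_elias_encode; infer_instance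

-- ===== CLAIM (what is proved, stated in full; the proofs are below) =====
def Claim_equal_integer_elias_encode : Prop := ∀ (z : Int), Dom_integer_elias_encode z → Pre_integer_elias_encode z → Spec_integer_elias_encode z (integer_elias_encode z)

-- ===== LEMMAS AND PROOFS =====

theorem bitsB_eq_bitsPos : ∀ n : Nat, 1 ≤ n → bitsB n = bitsPos n := by
  intro n
  induction n using Nat.strong_induction_on with
  | _ n ih =>
    intro h1
    rw [bitsB, bitsPos]
    by_cases h : n < 2
    · rw [dif_neg (show ¬ n > 1 by omega), dif_pos h]
    · rw [dif_pos (show n > 1 by omega), dif_neg h,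
        ih (n / 2) (by omega) (by omega)]

theorem bitsPos_length : ∀ n : Nat, 1 ≤ n → (bitsPos n).length = bitLenB n := by
  intro n
  induction n using Nat.strong_induction_on with
  | _ n ih =>
    intro h1
    rw [bitsPos, bitLenB]
    by_cases h : n < 2
    · have : n = 1 := by omega
      subst this
      rw [dif_pos (by omega), dif_neg (by omega), bitLenB]
      simp
    · rw [dif_neg h, dif_neg (show ¬ n = 0 by omega)]
      have := ih (n / 2) (by omega) (by omega)
      simp only [List.length_append, List.length_cons, List.length_nil]
      omega

theorem bitLenB_pos : ∀ v : Nat, 1 ≤ v → 1 ≤ bitLenB v := by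
  intro v h
  rw [bitLenB, dif_neg (show ¬ v = 0 by omega)]
  omega

theorem loopA_eq_omegaB : ∀ n : Nat, 1 ≤ n → ∀ code : List Char,
    loopA (bitsPos n) code = omegaB n ++ code := by
  intro n
  induction n using Nat.strong_induction_on with
  | _ n ih =>
    intro h1 code
    rw [loopA, omegaB]
    by_cases h : n < 2
    · have hn1 : n = 1 := by omega
      subst hn1
      have hb : bitsPos 1 = ['1'] := by rw [bitsPos, dif_pos (by omega)]
      rw [hb, dif_neg (show ¬ (['1'].length > 1) by simp),
        dif_pos (show (1 : Nat) < 2 by omega)]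
      simp
    · -- n ≥ 2
      have hlen : (bitsPos n).length = bitLenB n := bitsPos_length n (by omega)
      have hL2 : 2 ≤ bitLenB n := by
        rw [bitLenB, dif_neg (show ¬ n = 0 by omega)]
        have := bitLenB_pos (n / 2) (by omega)
        omega
      rw [dif_neg h, dif_pos (by omega)]
      have hcast : (((bitsPos n).length : Int) - 1).toNat = bitLenB n - 1 := by
        omega
      have hbin : (pyBin (((bitsPos n).length : Int) - 1)).drop 2 = bitsPos (bitLenB n - 1) := by
        rw [pyBin, if_neg (by omega), if_neg (by omega), hcast]
        simp
      rw [hbin]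
      have hLle : bitLenB n ≤ n := bitLenB_le n (by omega)
      rw [ih (bitLenB n - 1) (by omega) (by omega) (bitsPos n ++ code)]
      rw [bitsB_eq_bitsPos n (by omega)]
      simp

-- ===== VERDICT (by name: the statement is the Claim_ definition above) =====
theorem integer_elias_encode_spec : Claim_equal_integer_elias_encode := by
  intro z _ hpre
  unfold Spec_integer_elias_encode integer_elias_encode integer_elias_encode_alt
  unfold Pre_integer_elias_encode at hpre
  rw [if_neg (by omega)]
  have hz1 : z + 1 = ((z + 1).toNat : Int) := by omega
  have hn : 1 ≤ (z + 1).toNat := by omega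
  rw [pyBin, if_neg (by omega), if_neg (by omega)]
  simp only [List.drop_succ_cons, List.drop_zero]
  rw [hz1, Int.toNat_natCast, loopA_eq_omegaB _ hn, List.append_nil]
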